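-- pv_equiv track=rewrite | github.com/jahirulislammolla/CodeFights | Fights/magicalWell.py | magicalWell
-- ===== SOURCE A (Python) =====
-- def magicalWell(a, b, n):
--     s=0
--     while n>0:
--         s+=a*b
--         a+=1
--         b+=1
--         n-=1
--     return s
-- ===== SOURCE B (Python) =====
-- def magicalWell(a, b, n):
--     # Closed form: sum_{k=0}^{m-1} (a+k)(b+k) with m = max(n,0)
--     m = n if n > 0 else 0
--     return m*a*b + (a+b)*(m*(m-1)//2) + (m-1)*m*(2*m-1)//6
-- ===== Notes on version B (the rewrite author's own statement) =====
-- stated objective: faster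
-- what changed: Replaces the O(n) accumulation loop with the closed-form polynomial m*a*b + (a+b)*m(m-1)/2 + (m-1)m(2m-1)/6 (Gauss and square-pyramidal sums).
import Mathlib
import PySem

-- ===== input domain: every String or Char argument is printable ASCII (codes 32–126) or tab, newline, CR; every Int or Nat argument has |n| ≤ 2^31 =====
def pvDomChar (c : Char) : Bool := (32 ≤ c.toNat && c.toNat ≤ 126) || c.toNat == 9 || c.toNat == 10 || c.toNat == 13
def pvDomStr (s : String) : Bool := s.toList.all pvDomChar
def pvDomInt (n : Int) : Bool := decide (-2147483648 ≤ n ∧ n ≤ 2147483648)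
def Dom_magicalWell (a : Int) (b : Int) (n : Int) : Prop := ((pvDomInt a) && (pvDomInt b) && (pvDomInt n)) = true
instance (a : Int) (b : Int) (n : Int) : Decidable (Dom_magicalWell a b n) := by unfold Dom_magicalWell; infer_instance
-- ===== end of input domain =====

-- B replaces A's O(n) accumulation loop with the O(1) closed-form polynomial
-- m*a*b + (a+b)*m(m-1)/2 + (m-1)m(2m-1)/6 (Gauss and square-pyramidal sums).


-- ===== PORT A =====
-- the while loop of A: state (a, b, n, s), loops while n > 0
def magicalWellLoop (a b n s : Int) : Int :=
  if _h : n > 0 then magicalWellLoop (a + 1) (b + 1) (n - 1) (s + a * b) else s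
termination_by n.toNat
decreasing_by omega

def magicalWell (a : Int) (b : Int) (n : Int) : Int :=
  magicalWellLoop a b n 0

-- ===== PORT B =====
def magicalWell_alt (a : Int) (b : Int) (n : Int) : Int :=
  let m := if n > 0 then n else 0
  m * a * b + (a + b) * (PySem.Int.floordiv (m * (m - 1)) 2)
    + PySem.Int.floordiv ((m - 1) * m * (2 * m - 1)) 6

-- ===== PRECONDITION & SPEC =====
def Spec_magicalWell (a : Int) (b : Int) (n : Int) (out : Int) : Prop := out = magicalWell_alt a b n
instance (a : Int) (b : Int) (n : Int) (out : Int) : Decidable (Spec_magicalWell a b n out) := by unfold Spec_magicalWell; infer_instance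

-- ===== CLAIM (what is proved, stated in full; the proofs are below) =====
def Claim_equal_magicalWell : Prop := ∀ (a : Int) (b : Int) (n : Int), Dom_magicalWell a b n → Spec_magicalWell a b n (magicalWell a b n)

-- ===== LEMMAS AND PROOFS =====

-- the sum Σ_{k<m} (a+k)(b+k), written as the recursion A's loop performs
def pvSum (a b : Int) : Nat → Int
  | 0 => 0
  | m + 1 => a * b + pvSum (a + 1) (b + 1) m

theorem magicalWellLoop_nonpos (a b n s : Int) (h : ¬ n > 0) :
    magicalWellLoop a b n s = s := by
  rw [magicalWellLoop]; simp [h]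

theorem magicalWellLoop_eq_sum (m : Nat) : ∀ (a b s : Int),
    magicalWellLoop a b (m : Int) s = s + pvSum a b m := by
  induction m with
  | zero => intro a b s; rw [magicalWellLoop]; simp [pvSum]
  | succ k ih =>
    intro a b s
    rw [magicalWellLoop]
    have hpos : ((k : Int) + 1) > 0 := by positivity
    simp only [Nat.cast_succ, hpos, dite_true, add_sub_cancel_right]
    rw [ih]
    simp [pvSum]; ring

theorem two_dvd_pred_mul (m : Int) : ∃ t : Int, m * (m - 1) = 2 * t := by
  rcases Int.even_or_odd m with ⟨k, hk⟩ | ⟨k, hk⟩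
  · exact ⟨k * (m - 1), by rw [hk]; ring⟩
  · exact ⟨m * k, by rw [hk]; ring⟩

theorem six_dvd_pyr (m : Nat) : ∃ u : Int, ((m : Int) - 1) * m * (2 * m - 1) = 6 * u := by
  induction m with
  | zero => exact ⟨0, by norm_num⟩
  | succ k ih =>
    obtain ⟨u, hu⟩ := ih
    refine ⟨u + (k : Int) * k, ?_⟩
    push_cast
    nlinarith [hu]

theorem alt_eq_sum (m : Nat) : ∀ (a b : Int),
    magicalWell_alt a b (m : Int) = pvSum a b m := by
  induction m with
  | zero =>
    intro a b
    simp [magicalWell_alt, pvSum, PySem.Int.floordiv]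
  | succ k ih =>
    intro a b
    have hk2 : (0 : Int) < ((k : Int) + 1) := by positivity
    obtain ⟨t1, ht1⟩ := two_dvd_pred_mul ((k : Int) + 1)
    obtain ⟨t2, ht2⟩ := two_dvd_pred_mul (k : Int)
    obtain ⟨u1, hu1⟩ := six_dvd_pyr (k + 1)
    obtain ⟨u2, hu2⟩ := six_dvd_pyr k
    push_cast at hu1 hu2
    have e1 : magicalWell_alt a b ((k : Int) + 1)
        = ((k : Int) + 1) * a * b + (a + b) * t1 + u1 := by
      simp only [magicalWell_alt, hk2, if_pos]
      rw [show ((k : Int) + 1) * (((k : Int) + 1) - 1) = 2 * t1 by linarith [ht1],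
          show (((k : Int) + 1) - 1) * ((k : Int) + 1) * (2 * ((k : Int) + 1) - 1) = 6 * u1 by
            nlinarith [hu1],
          PySem.Int.floordiv_eq_ediv_of_pos (by norm_num),
          PySem.Int.floordiv_eq_ediv_of_pos (by norm_num),
          Int.mul_ediv_cancel_left _ (by norm_num : (2:Int) ≠ 0),
          Int.mul_ediv_cancel_left _ (by norm_num : (6:Int) ≠ 0)]
    rcases Nat.eq_zero_or_pos k with hk0 | hkpos
    · subst hk0
      norm_num [magicalWell_alt, pvSum, PySem.Int.floordiv]
    · have hkposI : (0 : Int) < (k : Int) := by exact_mod_cast hkpos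
      have e2 : magicalWell_alt (a + 1) (b + 1) (k : Int)
          = (k : Int) * (a + 1) * (b + 1) + ((a + 1) + (b + 1)) * t2 + u2 := by
        simp only [magicalWell_alt, hkposI, if_pos]
        rw [show (k : Int) * ((k : Int) - 1) = 2 * t2 from ht2,
            show ((k : Int) - 1) * (k : Int) * (2 * (k : Int) - 1) = 6 * u2 from hu2,
            PySem.Int.floordiv_eq_ediv_of_pos (by norm_num),
            PySem.Int.floordiv_eq_ediv_of_pos (by norm_num),
            Int.mul_ediv_cancel_left _ (by norm_num : (2:Int) ≠ 0),
            Int.mul_ediv_cancel_left _ (by norm_num : (6:Int) ≠ 0)]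
      have hsum : pvSum a b (k + 1) = a * b + pvSum (a + 1) (b + 1) k := rfl
      have hc : ((k + 1 : Nat) : Int) = ((k : Int) + 1) := by push_cast; ring
      rw [hc, hsum, ← ih, e1, e2]
      have ht1' : t1 = t2 + (k : Int) := by
        have : 2 * t1 = 2 * t2 + 2 * (k : Int) := by linear_combination ht2 - ht1
        linarith
      have hu1' : u1 = u2 + (k : Int) * (k : Int) := by
        have : 6 * u1 = 6 * u2 + 6 * ((k : Int) * (k : Int)) := by linear_combination hu2 - hu1
        linarith
      subst ht1' hu1'
      linear_combination ht2

theorem alt_nonpos (a b n : Int) (h : ¬ n > 0) : magicalWell_alt a b n = 0 := by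
  simp [magicalWell_alt, h, PySem.Int.floordiv]

-- ===== VERDICT (by name: the statement is the Claim_ definition above) =====
theorem magicalWell_spec : Claim_equal_magicalWell := by
  intro a b n _
  unfold Spec_magicalWell magicalWell
  by_cases h : n > 0
  · have hn : n = ((n.toNat : Nat) : Int) := by omega
    rw [hn, magicalWellLoop_eq_sum, alt_eq_sum]
    ring
  · rw [magicalWellLoop_nonpos _ _ _ _ h, alt_nonpos _ _ _ h]
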